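-- pv_equiv track=rewrite | github.com/anneryeo/invoice-payment-prediction-thesis | notebooks/eda/eda_credit_sales.py | consecutive_streak
-- ===== SOURCE A (Python) =====
-- def consecutive_streak(series, target_val):
--
--     streak = 0
--
--     result = []
--
--     for val in series:
--
--         if val == target_val:
--
--             streak += 1
--
--         else:
--
--             streak = 0
--
--         result.append(streak)
--
--     return result
-- ===== SOURCE B (Python) =====
-- from itertools import groupby
--
-- def consecutive_streak(series, target_val):
--     result = []
--     for key, run in groupby(series):
--         n = sum(1 for _ in run)
--         if key == target_val:
--             result.extend(range(1, n + 1))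
--         else:
--             result.extend([0] * n)
--     return result
-- ===== Notes on version B (the rewrite author's own statement) =====
-- stated objective: idiomatic
-- what changed: Replaced the scalar streak-counter pass by an itertools.groupby decomposition: split the series into maximal equal-value runs and emit range(1,n+1) for target runs and n zeros otherwise.
import Mathlib
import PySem

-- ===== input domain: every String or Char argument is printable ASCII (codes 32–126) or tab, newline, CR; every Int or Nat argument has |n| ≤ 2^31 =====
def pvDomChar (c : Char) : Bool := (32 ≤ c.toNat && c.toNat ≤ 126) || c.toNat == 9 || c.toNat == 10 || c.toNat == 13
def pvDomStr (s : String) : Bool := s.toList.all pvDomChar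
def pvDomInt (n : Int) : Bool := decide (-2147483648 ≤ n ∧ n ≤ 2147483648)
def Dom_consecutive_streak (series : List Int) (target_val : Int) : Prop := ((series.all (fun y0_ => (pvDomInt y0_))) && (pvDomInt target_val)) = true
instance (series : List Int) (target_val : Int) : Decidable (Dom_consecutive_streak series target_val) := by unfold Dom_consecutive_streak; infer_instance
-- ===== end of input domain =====

-- B replaces A's scalar streak-counter pass with an itertools.groupby run decomposition (idiomatic); return values proved equal.

-- ===== PORT A =====
-- A's loop: state (streak, result), result appended each step.
def consecutive_streak (series : List Int) (target_val : Int) : List Int :=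
  (series.foldl (fun (st : Int × List Int) val =>
      let streak : Int := if val = target_val then st.1 + 1 else 0
      (streak, st.2 ++ [streak])) (0, [])).2

-- ===== PORT B =====
-- groupby: maximal runs of equal values, as (key, length) pairs; (k, n) is the pending run.
def pvRuns (k : Int) (n : Nat) : List Int → List (Int × Nat)
  | [] => [(k, n)]
  | x :: xs => if x = k then pvRuns k (n + 1) xs else (k, n) :: pvRuns x 1 xs

-- per-run output: range(1, n+1) for a target run, n zeros otherwise
def pvRunOut (target_val : Int) (r : Int × Nat) : List Int :=
  if r.1 = target_val then (List.range r.2).map (fun i => (i : Int) + 1)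
  else List.replicate r.2 0

def consecutive_streak_alt (series : List Int) (target_val : Int) : List Int :=
  match series with
  | [] => []
  | x :: xs => (pvRuns x 1 xs).flatMap (pvRunOut target_val)

-- ===== PRECONDITION & SPEC =====
def Spec_consecutive_streak (series : List Int) (target_val : Int) (out : List Int) : Prop := out = consecutive_streak_alt series target_val
instance (series : List Int) (target_val : Int) (out : List Int) : Decidable (Spec_consecutive_streak series target_val out) := by unfold Spec_consecutive_streak; infer_instance

-- ===== CLAIM (what is proved, stated in full; the proofs are below) =====
def Claim_equal_consecutive_streak : Prop := ∀ (series : List Int) (target_val : Int), Dom_consecutive_streak series target_val → Spec_consecutive_streak series target_val (consecutive_streak series target_val)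

-- ===== LEMMAS AND PROOFS =====

-- streak values A emits, as plain structural recursion
def pvLoop (t : Int) (st : Int) : List Int → List Int
  | [] => []
  | v :: r =>
    let s : Int := if v = t then st + 1 else 0
    s :: pvLoop t s r

theorem pvFoldl_eq_loop (t : Int) (xs : List Int) : ∀ (st : Int) (acc : List Int),
    (xs.foldl (fun (p : Int × List Int) val =>
      let streak : Int := if val = t then p.1 + 1 else 0
      (streak, p.2 ++ [streak])) (st, acc)).2 = acc ++ pvLoop t st xs := by
  induction xs with
  | nil => intro st acc; simp [pvLoop]
  | cons v r ih =>
    intro st acc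
    simp only [List.foldl, pvLoop, ih, List.append_assoc, List.singleton_append]

def pvStreakOf (t k : Int) (m : Nat) : Int := if k = t then (m : Int) else 0

theorem pvGen_succ (t k : Int) (m : Nat) :
    pvRunOut t (k, m + 1) = pvRunOut t (k, m) ++ [pvStreakOf t k (m + 1)] := by
  by_cases h : k = t <;>
    simp [pvRunOut, pvStreakOf, h, List.range_succ, List.replicate_succ' (n := m)]

theorem pvRuns_flat (t : Int) (xs : List Int) : ∀ (k : Int) (m : Nat), 0 < m →
    (pvRuns k m xs).flatMap (pvRunOut t) = pvRunOut t (k, m) ++ pvLoop t (pvStreakOf t k m) xs := by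
  induction xs with
  | nil => intro k m _; simp [pvRuns, pvLoop]
  | cons x r ih =>
    intro k m hm
    by_cases hx : x = k
    · subst hx
      simp only [pvRuns, ite_true]
      rw [ih x (m + 1) (Nat.succ_pos m), pvGen_succ, List.append_assoc]
      congr 1
      by_cases hk : x = t
      · simp [pvLoop, pvStreakOf, hk]
      · simp [pvLoop, pvStreakOf, hk]
    · simp only [pvRuns, if_neg hx, List.flatMap_cons]
      rw [ih x 1 Nat.one_pos]
      congr 1
      by_cases hk : x = t
      · have hkt : k ≠ t := fun h => hx (hk.trans h.symm)
        simp [pvLoop, pvRunOut, pvStreakOf, hk, hkt, List.range_succ]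
      · by_cases hkt : k = t <;>
          simp [pvLoop, pvRunOut, pvStreakOf, hk]

-- ===== VERDICT (by name: the statement is the Claim_ definition above) =====
theorem consecutive_streak_spec : Claim_equal_consecutive_streak := by
  intro series t _
  unfold Spec_consecutive_streak consecutive_streak
  cases series with
  | nil => simp [consecutive_streak_alt]
  | cons x xs =>
    show _ = (pvRuns x 1 xs).flatMap (pvRunOut t)
    rw [pvFoldl_eq_loop t (x :: xs) 0 [], pvRuns_flat t xs x 1 Nat.one_pos]
    by_cases hk : x = t <;>
      simp [pvLoop, pvRunOut, pvStreakOf, hk, List.range_succ]
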